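-- pv_equiv track=rewrite | github.com/YouNannan/TradePromotingPython | src/futureindex.py | _reffer
-- ===== SOURCE A (Python) =====
-- def _reffer(theList, theRefDays):
--     '''将theList以回溯theRefDays天的形式返回，类似博易大师里的REF函数，
--         theRefDays就是往前推多少天，例如：theRefDays为0表示返回的指标是当天的值，为1表示返回的指标是昨天的值
--     '''
--     if theRefDays <= 0:
--         return theList
--     preList = []
--     for i in range(theRefDays):
--         preList.append(theList[i-i])
--     resultList = preList + theList[0:-theRefDays]
--     return resultList
-- ===== SOURCE B (Python) =====
-- def _reffer(theList, theRefDays):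
--     if theRefDays <= 0:
--         return theList
--     L = max(len(theList), theRefDays)
--     return [theList[0] if i < theRefDays else theList[i - theRefDays] for i in range(L)]
-- ===== Notes on version B (the rewrite author's own statement) =====
-- stated objective: simpler
-- what changed: Replaced the prefix-building loop plus negative-index tail slice with a single index-mapping comprehension over range(max(len, refDays)).
import Mathlib
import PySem

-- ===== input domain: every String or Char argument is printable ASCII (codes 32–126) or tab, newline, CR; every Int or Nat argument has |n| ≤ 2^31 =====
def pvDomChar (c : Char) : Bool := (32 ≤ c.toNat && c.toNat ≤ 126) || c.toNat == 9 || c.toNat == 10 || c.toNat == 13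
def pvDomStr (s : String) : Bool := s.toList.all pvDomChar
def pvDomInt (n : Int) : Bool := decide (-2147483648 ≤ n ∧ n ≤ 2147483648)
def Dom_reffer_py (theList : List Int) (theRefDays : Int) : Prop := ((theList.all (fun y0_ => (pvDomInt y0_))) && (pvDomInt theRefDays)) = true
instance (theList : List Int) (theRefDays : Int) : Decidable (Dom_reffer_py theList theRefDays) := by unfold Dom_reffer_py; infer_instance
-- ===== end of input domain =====

-- B replaces A's prefix-building loop plus negative-index tail slice by one
-- index-mapping comprehension over range(max(len, refDays)); return value only, same cost.

-- ===== PORT A =====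
def reffer_py (theList : List Int) (theRefDays : Int) : List Int :=
  if theRefDays ≤ 0 then theList
  else
    let preList := (PySem.List.pyRange 0 theRefDays 1).foldl
      (fun acc i => acc ++ [PySem.List.pyGetD theList (i - i) 0]) []
    preList ++ PySem.List.slice theList (some 0) (some (-theRefDays))

-- ===== PORT B =====
def reffer_py_alt (theList : List Int) (theRefDays : Int) : List Int :=
  if theRefDays ≤ 0 then theList
  else
    (PySem.List.pyRange 0 (max (theList.length : Int) theRefDays) 1).map
      (fun i => if i < theRefDays then PySem.List.pyGetD theList 0 0
                else PySem.List.pyGetD theList (i - theRefDays) 0)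

-- ===== PRECONDITION & SPEC =====
-- Pre_ excludes only the inputs where A raises IndexError: an empty list with positive theRefDays.
def Pre_reffer_py (theList : List Int) (theRefDays : Int) : Prop :=
  theRefDays ≤ 0 ∨ theList ≠ []
instance (theList : List Int) (theRefDays : Int) : Decidable (Pre_reffer_py theList theRefDays) := by unfold Pre_reffer_py; infer_instance
def pvWitness_reffer_py : List Int × Int := ([3, 1, 2], 2)

def Spec_reffer_py (theList : List Int) (theRefDays : Int) (out : List Int) : Prop := out = reffer_py_alt theList theRefDays
instance (theList : List Int) (theRefDays : Int) (out : List Int) : Decidable (Spec_reffer_py theList theRefDays out) := by unfold Spec_reffer_py; infer_instance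

-- ===== CLAIM (what is proved, stated in full; the proofs are below) =====
def Claim_equal_reffer_py : Prop := ∀ (theList : List Int) (theRefDays : Int), Dom_reffer_py theList theRefDays → Pre_reffer_py theList theRefDays → Spec_reffer_py theList theRefDays (reffer_py theList theRefDays)

-- ===== LEMMAS AND PROOFS =====

-- canonical form: both programs, for d > 0 and a nonempty list, return
-- replicate d (head) ++ take (len - d) list
theorem canon_of_map (x : Int) (xs : List Int) (d : Nat) (hd : 0 < d) :
    (List.range (max (x :: xs).length d)).map
      (fun k => if k < d then x else (x :: xs).getD (k - d) 0)
    = List.replicate d x ++ (x :: xs).take ((x :: xs).length - d) := by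
  apply List.ext_getElem
  · simp [List.length_take]; omega
  · intro i hi1 hi2
    have hi : i < max (xs.length + 1) d := by simpa using hi1
    simp only [List.getElem_map, List.getElem_range]
    by_cases h : i < d
    · rw [List.getElem_append_left (by simpa using h)]
      simp [h]
    · have hid : i - d < (x :: xs).length := by simp; omega
      rw [List.getElem_append_right (by simpa using h)]
      simp only [List.length_replicate]
      rw [List.getElem_take]
      rw [if_neg h, List.getD_eq_getElem _ _ hid]

theorem reffer_py_canon (x : Int) (xs : List Int) (d : Int) (hd : 0 < d) :
    reffer_py (x :: xs) d
    = List.replicate d.toNat x ++ (x :: xs).take ((x :: xs).length - d.toNat) := by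
  unfold reffer_py
  rw [if_neg (by omega)]
  simp only [PySem.List.foldl_append_singleton_eq_map, List.nil_append]
  have hcast : d = ((d.toNat : Nat) : Int) := by omega
  rw [hcast, PySem.List.pyRange_zero_natCast, PySem.List.slice_zero_start,
    PySem.List.slice_to_neg_natCast _ _ (by omega)]
  congr 1
  rw [List.map_map]
  have : (List.range d.toNat).map ((fun i => PySem.List.pyGetD (x :: xs) (i - i) 0) ∘ (fun k : Nat => (k : Int)))
      = (List.range d.toNat).map (fun _ => x) := by
    apply List.map_congr_left
    intro a _
    simp [PySem.List.pyGetD_zero_cons]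
  rw [this, List.map_const', List.length_range]
  simp
  omega

theorem reffer_py_alt_canon (x : Int) (xs : List Int) (d : Int) (hd : 0 < d) :
    reffer_py_alt (x :: xs) d
    = List.replicate d.toNat x ++ (x :: xs).take ((x :: xs).length - d.toNat) := by
  unfold reffer_py_alt
  rw [if_neg (by omega)]
  have hmax : max ((x :: xs).length : Int) d = ((max (x :: xs).length d.toNat : Nat) : Int) := by
    push_cast; omega
  rw [hmax, PySem.List.pyRange_zero_natCast, List.map_map]
  rw [← canon_of_map x xs d.toNat (by omega)]
  apply List.map_congr_left
  intro k _
  by_cases h : (k : Int) < d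
  · simp only [Function.comp_apply, if_pos h, PySem.List.pyGetD_zero_cons]
    rw [if_pos (by omega)]
  · have hk : (k : Int) - d = ((k - d.toNat : Nat) : Int) := by omega
    simp only [Function.comp_apply, if_neg h, hk, PySem.List.pyGetD_natCast]
    rw [if_neg (by omega)]

-- ===== VERDICT (by name: the statement is the Claim_ definition above) =====
theorem reffer_py_spec : Claim_equal_reffer_py := by
  intro theList theRefDays _ hpre
  unfold Spec_reffer_py
  by_cases hd : theRefDays ≤ 0
  · simp [reffer_py, reffer_py_alt, hd]
  · rcases theList with _ | ⟨x, xs⟩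
    · rcases hpre with h | h
      · omega
      · exact absurd rfl h
    · rw [reffer_py_canon x xs theRefDays (by omega),
        reffer_py_alt_canon x xs theRefDays (by omega)]
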